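-- pv_equiv track=rewrite | github.com/daniel-mf-92/holyc-inference | tests/test_q8_0_avx2_dot_lanes.py | q8_0_mul_i16_lanes_to_i32_pairs_avx2
-- ===== SOURCE A (Python) =====
-- Q8_0_AVX2_VALUES_PER_BLOCK = 32
--
-- Q8_0_AVX2_PAIR_COUNT = 16
--
-- Q8_0_AVX2_OK = 0
--
-- Q8_0_AVX2_ERR_NULL_PTR = 1
--
-- Q8_0_AVX2_ERR_BAD_LEN = 2
--
-- def q8_0_mul_i16_lanes_to_i32_pairs_avx2(lhs_i16, rhs_i16):
--     if lhs_i16 is None or rhs_i16 is None: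
--         return Q8_0_AVX2_ERR_NULL_PTR, []
--     if len(lhs_i16) < Q8_0_AVX2_VALUES_PER_BLOCK:
--         return Q8_0_AVX2_ERR_BAD_LEN, []
--     if len(rhs_i16) < Q8_0_AVX2_VALUES_PER_BLOCK:
--         return Q8_0_AVX2_ERR_BAD_LEN, []
--
--     out = [0] * Q8_0_AVX2_PAIR_COUNT
--     for pair_index in range(Q8_0_AVX2_PAIR_COUNT):
--         lane_base = pair_index * 2
--         out[pair_index] = (
--             int(lhs_i16[lane_base]) * int(rhs_i16[lane_base])
--             + int(lhs_i16[lane_base + 1]) * int(rhs_i16[lane_base + 1])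
--         )
--     return Q8_0_AVX2_OK, out
-- ===== SOURCE B (Python) =====
-- Q8_0_AVX2_VALUES_PER_BLOCK = 32
-- Q8_0_AVX2_PAIR_COUNT = 16
-- Q8_0_AVX2_OK = 0
-- Q8_0_AVX2_ERR_NULL_PTR = 1
-- Q8_0_AVX2_ERR_BAD_LEN = 2
--
-- def q8_0_mul_i16_lanes_to_i32_pairs_avx2(lhs_i16, rhs_i16):
--     if lhs_i16 is None or rhs_i16 is None:
--         return Q8_0_AVX2_ERR_NULL_PTR, []
--     if len(lhs_i16) < Q8_0_AVX2_VALUES_PER_BLOCK: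
--         return Q8_0_AVX2_ERR_BAD_LEN, []
--     if len(rhs_i16) < Q8_0_AVX2_VALUES_PER_BLOCK:
--         return Q8_0_AVX2_ERR_BAD_LEN, []
--
--     # index-free recursion: destructure two lanes off each list per step,
--     # emitting one multiply-accumulate result, 16 times.
--     def mac_pairs(ls, rs, pairs_left):
--         if pairs_left == 0:
--             return []
--         l0, l1, *lt = ls
--         r0, r1, *rt = rs
--         return [int(l0) * int(r0) + int(l1) * int(r1)] + mac_pairs(lt, rt, pairs_left - 1)
--
--     return Q8_0_AVX2_OK, mac_pairs(list(lhs_i16), list(rhs_i16), Q8_0_AVX2_PAIR_COUNT)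
-- ===== Notes on version B (the rewrite author's own statement) =====
-- stated objective: alternative
-- what changed: Replaces A's index-driven loop (range over pair indices, arithmetic lane_base indexing, writes into a preallocated out[16]) with an index-free recursion that destructures two lanes off the front of each list per step and builds the output list by consing, counting pairs down from 16.
import Mathlib
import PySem

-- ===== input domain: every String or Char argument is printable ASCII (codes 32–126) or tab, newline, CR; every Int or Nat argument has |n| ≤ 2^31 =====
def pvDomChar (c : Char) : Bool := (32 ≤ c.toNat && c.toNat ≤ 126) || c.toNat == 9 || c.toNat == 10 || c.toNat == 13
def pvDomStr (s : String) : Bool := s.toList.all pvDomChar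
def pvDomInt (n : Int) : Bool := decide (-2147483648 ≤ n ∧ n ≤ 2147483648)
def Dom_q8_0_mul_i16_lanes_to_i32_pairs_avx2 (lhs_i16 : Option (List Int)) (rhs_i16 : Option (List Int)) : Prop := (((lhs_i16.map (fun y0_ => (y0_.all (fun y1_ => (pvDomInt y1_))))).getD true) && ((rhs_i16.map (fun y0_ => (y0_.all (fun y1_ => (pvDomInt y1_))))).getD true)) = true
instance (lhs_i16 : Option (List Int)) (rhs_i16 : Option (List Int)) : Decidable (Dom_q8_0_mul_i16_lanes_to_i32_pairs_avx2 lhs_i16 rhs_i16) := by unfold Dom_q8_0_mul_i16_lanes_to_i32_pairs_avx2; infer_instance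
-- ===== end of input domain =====

-- B replaces A's index-driven loop writing into a preallocated out[16] with an index-free
-- recursion that destructures two lanes off each list per step (alternative decomposition, same cost).
-- ===== PORT A =====
def q8_0_mul_i16_lanes_to_i32_pairs_avx2 (lhs_i16 : Option (List Int)) (rhs_i16 : Option (List Int)) : Int × List Int :=
  match lhs_i16, rhs_i16 with
  | none, _ => (1, [])
  | _, none => (1, [])
  | some lhs, some rhs =>
    if (lhs.length : Int) < 32 then (2, [])
    else if (rhs.length : Int) < 32 then (2, [])
    else
      -- out = [0]*16; for pair_index in range(16): out[pair_index] = lhs[2i]*rhs[2i] + lhs[2i+1]*rhs[2i+1]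
      -- indexing is in range (length ≥ 32), so pyGetD/pySetD are exact here
      let out : List Int := List.replicate 16 0
      let out := (PySem.List.pyRange 0 16 1).foldl (fun out pair_index =>
        let lane_base := pair_index * 2
        PySem.List.pySetD out pair_index
          (PySem.List.pyGetD lhs lane_base 0 * PySem.List.pyGetD rhs lane_base 0
            + PySem.List.pyGetD lhs (lane_base + 1) 0 * PySem.List.pyGetD rhs (lane_base + 1) 0)) out
      (0, out)

-- ===== PORT B =====
-- helper for B: one multiply-accumulate per recursive step, two lanes consumed from each list.
-- The final wildcard arm is a totality guard only: under B's length guards (≥ 32 lanes,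
-- 16 pairs) the destructuring always succeeds, matching the Python.
def macPairs : List Int → List Int → Nat → List Int
  | _, _, 0 => []
  | l0 :: l1 :: lt, r0 :: r1 :: rt, n + 1 => (l0 * r0 + l1 * r1) :: macPairs lt rt n
  | _, _, _ + 1 => []

def q8_0_mul_i16_lanes_to_i32_pairs_avx2_alt (lhs_i16 : Option (List Int)) (rhs_i16 : Option (List Int)) : Int × List Int :=
  match lhs_i16, rhs_i16 with
  | none, _ => (1, [])
  | _, none => (1, [])
  | some lhs, some rhs =>
    if (lhs.length : Int) < 32 then (2, [])
    else if (rhs.length : Int) < 32 then (2, [])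
    else (0, macPairs lhs rhs 16)

-- ===== PRECONDITION & SPEC =====
def Spec_q8_0_mul_i16_lanes_to_i32_pairs_avx2 (lhs_i16 : Option (List Int)) (rhs_i16 : Option (List Int)) (out : Int × List Int) : Prop := out = q8_0_mul_i16_lanes_to_i32_pairs_avx2_alt lhs_i16 rhs_i16
instance (lhs_i16 : Option (List Int)) (rhs_i16 : Option (List Int)) (out : Int × List Int) : Decidable (Spec_q8_0_mul_i16_lanes_to_i32_pairs_avx2 lhs_i16 rhs_i16 out) := by unfold Spec_q8_0_mul_i16_lanes_to_i32_pairs_avx2; infer_instance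

-- ===== CLAIM =====
def Claim_equal_q8_0_mul_i16_lanes_to_i32_pairs_avx2 : Prop := ∀ (lhs_i16 : Option (List Int)) (rhs_i16 : Option (List Int)), Dom_q8_0_mul_i16_lanes_to_i32_pairs_avx2 lhs_i16 rhs_i16 → Spec_q8_0_mul_i16_lanes_to_i32_pairs_avx2 lhs_i16 rhs_i16 (q8_0_mul_i16_lanes_to_i32_pairs_avx2 lhs_i16 rhs_i16)

-- ===== LEMMAS AND PROOFS =====

-- macPairs on sufficiently long lists computes the multiply-accumulate of lanes 2k, 2k+1.
theorem macPairs_spec : ∀ (n : Nat) (ls rs : List Int), 2 * n ≤ ls.length → 2 * n ≤ rs.length →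
    macPairs ls rs n = (List.range n).map (fun k =>
      ls.getD (2 * k) 0 * rs.getD (2 * k) 0 + ls.getD (2 * k + 1) 0 * rs.getD (2 * k + 1) 0) := by
  intro n
  induction n with
  | zero => intro ls rs _ _; simp [macPairs]
  | succ n ih =>
    intro ls rs hl hr
    match ls, rs with
    | [], _ => simp at hl
    | [_], _ => simp at hl; omega
    | _, [] => simp at hr
    | _, [_] => simp at hr; omega
    | l0 :: l1 :: lt, r0 :: r1 :: rt =>
      simp only [List.length_cons] at hl hr
      rw [macPairs, ih lt rt (by omega) (by omega), List.range_succ_eq_map]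
      simp only [List.map_cons, List.map_map]
      congr 1

-- ===== VERDICT =====
theorem q8_0_mul_i16_lanes_to_i32_pairs_avx2_spec : Claim_equal_q8_0_mul_i16_lanes_to_i32_pairs_avx2 := by
  intro lhs_i16 rhs_i16 _
  unfold Spec_q8_0_mul_i16_lanes_to_i32_pairs_avx2
  match lhs_i16, rhs_i16 with
  | none, _ => rfl
  | some lhs, none => rfl
  | some lhs, some rhs =>
    simp only [q8_0_mul_i16_lanes_to_i32_pairs_avx2, q8_0_mul_i16_lanes_to_i32_pairs_avx2_alt]
    split_ifs with h1 h2
    · rfl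
    · rfl
    · have hl : 2 * 16 ≤ lhs.length := by omega
      have hr : 2 * 16 ≤ rhs.length := by omega
      rw [macPairs_spec 16 lhs rhs hl hr]
      have e16 : PySem.List.pyRange 0 16 1 = [0,1,2,3,4,5,6,7,8,9,10,11,12,13,14,15] := by decide
      have er : List.range 16 = [0,1,2,3,4,5,6,7,8,9,10,11,12,13,14,15] := by decide
      simp only [e16, er, List.foldl, List.map, List.replicate]
      norm_num [PySem.List.pySetD_of_nonneg, PySem.List.pyGetD_of_nonneg, Int.toNat, List.set]
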